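-- pv_equiv track=rewrite | github.com/Github-SG03/Python-Masterclass | practise/python_program_list_intermediate/ArithematicMeanJumps.py | arithmetic_mean_jumps
-- ===== SOURCE A (Python) =====
-- def arithmetic_mean_jumps(n):
--     steps = 0
--     seen = set()  # To detect oscillation
--
--     while n >= 10 and n not in seen:
--         seen.add(n)
--         digits = [int(d) for d in str(n)]
--         n = sum(digits) // len(digits)  # Arithmetic mean (integer division)
--         steps += 1
--
--     return steps, n  # Returns number of steps and the final stable value
-- ===== SOURCE B (Python) =====
-- def arithmetic_mean_jumps(n):
--     # One jump always suffices: for n >= 10 the digit mean sum//len is <= 9.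
--     if n < 10:
--         return 0, n
--     digits = [int(d) for d in str(n)]
--     return 1, sum(digits) // len(digits)
-- ===== Notes on version B (the rewrite author's own statement) =====
-- stated objective: simpler
-- what changed: Replaces the cycle-detecting while-loop with a seen-set by a closed two-case form, using the fact that the digit mean of any n >= 10 is at most 9, so the loop always runs exactly once.
import Mathlib
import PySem

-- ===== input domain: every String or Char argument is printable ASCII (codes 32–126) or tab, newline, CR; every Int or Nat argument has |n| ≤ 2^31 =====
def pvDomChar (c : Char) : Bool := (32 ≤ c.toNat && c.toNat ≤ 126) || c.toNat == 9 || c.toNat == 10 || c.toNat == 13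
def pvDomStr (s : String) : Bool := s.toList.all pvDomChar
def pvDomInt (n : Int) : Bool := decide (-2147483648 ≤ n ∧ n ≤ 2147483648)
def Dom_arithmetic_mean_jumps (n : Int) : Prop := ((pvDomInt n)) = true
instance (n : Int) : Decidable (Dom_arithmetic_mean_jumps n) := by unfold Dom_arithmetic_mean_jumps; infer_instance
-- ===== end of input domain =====

-- B replaces A's cycle-detecting while-loop (with a seen-set) by a closed two-case form,
-- using the fact that the digit mean of any n >= 10 is at most 9 (objective: simpler).

-- ===== PORT A =====

-- digits = [int(d) for d in str(n)]; the .getD 0 default is unreachable here: inside the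
-- loop n >= 10, so str(n) consists of decimal digits only and int(d) never raises.
def amjDigits (n : Int) : List Int :=
  (PySem.Int.toChars n).map (fun c => (PySem.Int.ofChars? [c]).getD 0)

-- n = sum(digits) // len(digits)
def amjMean (n : Int) : Int :=
  PySem.Int.floordiv (amjDigits n).sum ((amjDigits n).length : Int)

-- The next four lemmas are needed by the port itself (termination of the while-loop):
-- every character of str(n) parses (via int(d), defaulting to 0) to a value in [0, 9].
lemma amj_mem_toDigitsCore (f : Nat) : ∀ (n : Nat) (acc : List Char) (c : Char),
    c ∈ Nat.toDigitsCore 10 f n acc → (∃ m, m < 10 ∧ c = Nat.digitChar m) ∨ c ∈ acc := by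
  induction f with
  | zero => intro n acc c hc; exact Or.inr hc
  | succ f ih =>
    intro n acc c hc
    simp only [Nat.toDigitsCore] at hc
    split at hc
    · rcases List.mem_cons.mp hc with h | h
      · exact Or.inl ⟨n % 10, Nat.mod_lt _ (by omega), h⟩
      · exact Or.inr h
    · rcases ih (n / 10) (Nat.digitChar (n % 10) :: acc) c hc with h | h
      · exact Or.inl h
      · rcases List.mem_cons.mp h with h | h
        · exact Or.inl ⟨n % 10, Nat.mod_lt _ (by omega), h⟩
        · exact Or.inr h

lemma amj_toDigitsCore_len (f : Nat) : ∀ (n : Nat) (acc : List Char),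
    acc.length ≤ (Nat.toDigitsCore 10 f n acc).length := by
  induction f with
  | zero => intro n acc; simp [Nat.toDigitsCore]
  | succ f ih =>
    intro n acc
    simp only [Nat.toDigitsCore]
    split
    · simp
    · calc acc.length ≤ (Nat.digitChar (n % 10) :: acc).length := by simp
        _ ≤ _ := ih _ _

lemma amj_toDigits_ne_nil (n : Nat) : Nat.toDigits 10 n ≠ [] := by
  have h : 1 ≤ (Nat.toDigits 10 n).length := by
    show 1 ≤ (Nat.toDigitsCore 10 (n+1) n []).length
    simp only [Nat.toDigitsCore]
    split
    · simp
    · calc 1 = ([Nat.digitChar (n % 10)] : List Char).length := by simp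
        _ ≤ _ := amj_toDigitsCore_len _ _ _
  intro h0; rw [h0] at h; simp at h

lemma amj_char_bounds (n : Int) (c : Char) (hc : c ∈ PySem.Int.toChars n) :
    0 ≤ (PySem.Int.ofChars? [c]).getD 0 ∧ (PySem.Int.ofChars? [c]).getD 0 ≤ 9 := by
  unfold PySem.Int.toChars at hc
  split at hc
  · rcases List.mem_cons.mp hc with h | h
    · subst h; decide
    · rcases amj_mem_toDigitsCore _ _ _ _ h with ⟨m, hm, rfl⟩ | h
      · interval_cases m <;> decide
      · simp at h
  · rcases amj_mem_toDigitsCore _ _ _ _ hc with ⟨m, hm, rfl⟩ | h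
    · interval_cases m <;> decide
    · simp at h

-- termination lemma for the while-loop: the digit mean is always < 10
lemma amjMean_lt_ten (n : Int) : amjMean n < 10 := by
  have hne : amjDigits n ≠ [] := by
    unfold amjDigits
    simp only [ne_eq, List.map_eq_nil_iff]
    unfold PySem.Int.toChars
    split
    · simp
    · exact amj_toDigits_ne_nil _
  have hlen : 0 < ((amjDigits n).length : Int) := by
    have := List.length_pos_of_ne_nil hne; exact_mod_cast this
  have hsum : (amjDigits n).sum ≤ 9 * ((amjDigits n).length : Int) := by
    have hb : ∀ x ∈ amjDigits n, x ≤ (9 : Int) := by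
      intro x hx
      rcases List.mem_map.mp hx with ⟨c, hc, rfl⟩
      exact (amj_char_bounds n c hc).2
    have := List.sum_le_card_nsmul (amjDigits n) 9 hb
    simpa [mul_comm] using this
  unfold amjMean
  rw [PySem.Int.floordiv_lt_iff_lt_mul hlen]
  omega

-- the while-loop of A, with state (steps, seen, n)
def amjLoop (steps : Int) (seen : PySem.Set Int) (n : Int) : Int × Int :=
  if 10 ≤ n ∧ PySem.Set.contains seen n = false then
    amjLoop (steps + 1) (PySem.Set.add seen n) (amjMean n)
  else
    (steps, n)
termination_by (if 10 ≤ n then 1 else 0 : Nat)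
decreasing_by
  rename_i h
  rw [if_neg (by have := amjMean_lt_ten n; omega), if_pos h.1]
  omega

def arithmetic_mean_jumps (n : Int) : Int × Int := amjLoop 0 PySem.Set.empty n

-- ===== PORT B =====
def arithmetic_mean_jumps_alt (n : Int) : Int × Int :=
  if n < 10 then (0, n) else (1, amjMean n)

-- ===== PRECONDITION & SPEC =====
def Spec_arithmetic_mean_jumps (n : Int) (out : Int × Int) : Prop := out = arithmetic_mean_jumps_alt n
instance (n : Int) (out : Int × Int) : Decidable (Spec_arithmetic_mean_jumps n out) := by unfold Spec_arithmetic_mean_jumps; infer_instance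

-- ===== CLAIM (what is proved, stated in full; the proofs are below) =====
def Claim_equal_arithmetic_mean_jumps : Prop := ∀ (n : Int), Dom_arithmetic_mean_jumps n → Spec_arithmetic_mean_jumps n (arithmetic_mean_jumps n)

-- ===== LEMMAS AND PROOFS =====

-- ===== VERDICT (by name: the statement is the Claim_ definition above) =====
theorem arithmetic_mean_jumps_spec : Claim_equal_arithmetic_mean_jumps := by
  intro n _
  unfold Spec_arithmetic_mean_jumps arithmetic_mean_jumps arithmetic_mean_jumps_alt
  by_cases h : 10 ≤ n
  · rw [amjLoop, if_pos ⟨h, rfl⟩, amjLoop,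
      if_neg (by have := amjMean_lt_ten n; omega), if_neg (by omega)]
    norm_num
  · rw [amjLoop, if_neg (by omega), if_pos (by omega)]
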